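-- pv_equiv track=rewrite | github.com/bgunson/TaffyTangle | autoPlayer.py | are_adjacent
-- ===== SOURCE A (Python) =====
-- def are_adjacent(r1, c1, r2, c2):
--     """
--     Test the coordinates of the selected game pieces to see if they are adjacent horizontally or vertically only.
--     :param r1: The row of the first selected piece.
--     :param c1: The column of the first selected piece.
--     :param r2:  The row of the second selected piece.
--     :param c2: The column of the second selected piece.
--     :return: True if the two pieces are directly adjacent. False, if they are not.
--     """
--     tests = [(r1 == r2) and (c1+1 == c2),
--              (c1 == c2) and (r1+1 == r2),
--              (r1 == r2) and (c1-1 == c2),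
--              (c1 == c2) and (r1-1 == r2)]
--     # Try all circumstances where the selected pieces are adjacent pieces (only vertically or horizontally).
--     for i in range(len(tests)):
--         try:
--             if tests[i]:
--                 return True
--         except IndexError:
--             continue
--     return False
-- ===== SOURCE B (Python) =====
-- def are_adjacent(r1, c1, r2, c2):
--     return abs(r1 - r2) + abs(c1 - c2) == 1
-- ===== Notes on version B (the rewrite author's own statement) =====
-- stated objective: simpler
-- what changed: Replaces the four-case test list and the try/except index loop with a single Manhattan-distance formula: the cells are adjacent iff |r1-r2| + |c1-c2| == 1 (no case enumeration at all).
import Mathlib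
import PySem

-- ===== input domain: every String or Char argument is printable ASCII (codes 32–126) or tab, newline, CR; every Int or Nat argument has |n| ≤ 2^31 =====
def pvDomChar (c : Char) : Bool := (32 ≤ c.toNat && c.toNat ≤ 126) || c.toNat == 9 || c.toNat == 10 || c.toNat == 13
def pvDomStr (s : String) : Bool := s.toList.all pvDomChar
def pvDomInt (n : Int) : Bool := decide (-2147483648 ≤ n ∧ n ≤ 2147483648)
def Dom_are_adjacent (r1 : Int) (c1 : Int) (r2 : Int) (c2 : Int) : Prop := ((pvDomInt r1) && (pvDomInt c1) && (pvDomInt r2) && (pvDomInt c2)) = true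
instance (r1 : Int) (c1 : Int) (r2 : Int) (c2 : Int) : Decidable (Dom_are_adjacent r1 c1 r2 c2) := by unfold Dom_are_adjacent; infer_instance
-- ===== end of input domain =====

-- B replaces A's four-case test list and try/except index loop with a single Manhattan-distance formula (objective: simpler).


-- ===== PORT A =====
-- the index loop over the list of tests (the try/except can never fire on int inputs; the loop returns True at the first true test)
def areAdjLoop (tests : List Bool) : Bool :=
  match tests with
  | [] => false
  | t :: ts => if t then true else areAdjLoop ts

def are_adjacent (r1 : Int) (c1 : Int) (r2 : Int) (c2 : Int) : Bool :=
  let tests := [(r1 == r2) && (c1 + 1 == c2),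
                (c1 == c2) && (r1 + 1 == r2),
                (r1 == r2) && (c1 - 1 == c2),
                (c1 == c2) && (r1 - 1 == r2)]
  areAdjLoop tests

-- ===== PORT B =====
def are_adjacent_alt (r1 : Int) (c1 : Int) (r2 : Int) (c2 : Int) : Bool :=
  |r1 - r2| + |c1 - c2| == 1

-- ===== PRECONDITION & SPEC =====
def Spec_are_adjacent (r1 : Int) (c1 : Int) (r2 : Int) (c2 : Int) (out : Bool) : Prop := out = are_adjacent_alt r1 c1 r2 c2
instance (r1 : Int) (c1 : Int) (r2 : Int) (c2 : Int) (out : Bool) : Decidable (Spec_are_adjacent r1 c1 r2 c2 out) := by unfold Spec_are_adjacent; infer_instance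

-- ===== CLAIM (what is proved, stated in full; the proofs are below) =====
def Claim_equal_are_adjacent : Prop := ∀ (r1 : Int) (c1 : Int) (r2 : Int) (c2 : Int), Dom_are_adjacent r1 c1 r2 c2 → Spec_are_adjacent r1 c1 r2 c2 (are_adjacent r1 c1 r2 c2)

-- ===== LEMMAS AND PROOFS =====

-- ===== VERDICT (by name: the statement is the Claim_ definition above) =====
theorem are_adjacent_spec : Claim_equal_are_adjacent := by
  intro r1 c1 r2 c2 _
  unfold Spec_are_adjacent are_adjacent are_adjacent_alt
  rw [Bool.eq_iff_iff]
  simp only [areAdjLoop, Bool.if_true_left, Bool.or_eq_true, Bool.and_eq_true, beq_iff_eq,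
    decide_eq_true_eq, Bool.false_eq_true, or_false]
  rcases abs_cases (r1 - r2) with ⟨ha, _⟩ | ⟨ha, _⟩ <;>
    rcases abs_cases (c1 - c2) with ⟨hb, _⟩ | ⟨hb, _⟩ <;>
      constructor <;> intro h <;> omega
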